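-- pv_equiv track=rewrite | github.com/Oaklight/onehub_prices | src/dotenv.py | _collect_multiline_value
-- ===== SOURCE A (Python) =====
-- def _find_unescaped_quote(text: str) -> int:
--     """Return position of the first unescaped double-quote in *text*, or -1."""
--     pos = 0
--     while pos < len(text):
--         if text[pos] == "\\" and pos + 1 < len(text):
--             pos += 2
--             continue
--         if text[pos] == '"':
--             return pos
--         pos += 1
--     return -1
--
-- def _collect_multiline_value(
--     lines: list[str], start_idx: int, first_fragment: str
-- ) -> tuple[str, int]:
--     """Accumulate continuation lines for a multiline double-quoted value.
--
--     Args: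
--         lines: All lines of the .env content.
--         start_idx: Index of the first continuation line to inspect.
--         first_fragment: Text after the opening ``"`` on the first line.
--
--     Returns:
--         Tuple of (raw concatenated value, next line index to process).
--     """
--     parts = [first_fragment]
--     i = start_idx
--     while i < len(lines):
--         next_line = lines[i]
--         i += 1
--         close_pos = _find_unescaped_quote(next_line)
--         if close_pos >= 0:
--             parts.append(next_line[:close_pos])
--             break
--         parts.append(next_line)
--     return "".join(parts), i
-- ===== SOURCE B (Python) =====
-- def _find_closing_quote(line: str) -> int:
--     """Position of the first unescaped double-quote, or -1: jump between
--     quote candidates with str.find and check backslash-run parity."""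
--     start = 0
--     while True:
--         p = line.find('"', start)
--         if p == -1:
--             return -1
--         b = p
--         while b > 0 and line[b - 1] == "\\":
--             b -= 1
--         if (p - b) % 2 == 0:
--             return p
--         start = p + 1
--
-- def _collect_multiline_value(
--     lines: list[str], start_idx: int, first_fragment: str
-- ) -> tuple[str, int]:
--     # Phase 1: locate the line holding the closing quote (and its position).
--     n = len(lines)
--     i = start_idx
--     close = -1
--     while i < n:
--         close = _find_closing_quote(lines[i])
--         if close >= 0:
--             break
--         i += 1
--     # Phase 2: assemble the value in a single join.
--     body = "".join([lines[k] for k in range(start_idx, i)])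
--     if close >= 0:
--         return first_fragment + body + lines[i][:close], i + 1
--     return first_fragment + body, i
-- ===== Notes on version B (the rewrite author's own statement) =====
-- stated objective: alternative
-- what changed: B is a two-phase rewrite: phase 1 only locates the closing line and quote position (the within-line scan jumps between quote candidates with str.find and accepts the first with an even run of preceding backslashes, instead of A's char-by-char escape-skipping walk), phase 2 assembles the value in a single join instead of A's append-parts-then-join loop.
import Mathlib
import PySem

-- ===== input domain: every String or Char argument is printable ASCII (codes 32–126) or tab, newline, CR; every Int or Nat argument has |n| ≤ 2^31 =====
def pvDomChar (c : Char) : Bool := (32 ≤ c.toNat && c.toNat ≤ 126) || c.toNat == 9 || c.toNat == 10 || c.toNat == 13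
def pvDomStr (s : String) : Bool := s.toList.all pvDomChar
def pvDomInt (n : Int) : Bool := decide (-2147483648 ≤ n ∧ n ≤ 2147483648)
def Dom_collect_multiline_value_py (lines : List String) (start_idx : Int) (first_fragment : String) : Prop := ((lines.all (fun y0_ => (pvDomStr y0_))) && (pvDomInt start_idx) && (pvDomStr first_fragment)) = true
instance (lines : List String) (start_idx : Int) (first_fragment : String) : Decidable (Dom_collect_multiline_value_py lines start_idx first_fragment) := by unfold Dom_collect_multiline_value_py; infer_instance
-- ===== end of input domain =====

-- B replaces A's char-by-char escape-skipping scan by a jump-between-quote-candidates scan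
-- with a backslash-run parity check, and accumulates the value directly instead of joining parts.

-- ===== PORT A =====
-- _find_unescaped_quote: pos walks the string, a backslash (with a char after it) skips 2.
def fuqA (cs : List Char) (pos : Nat) : Int :=
  if h : pos < cs.length then
    if cs[pos] = '\\' ∧ pos + 1 < cs.length then fuqA cs (pos + 2)
    else if cs[pos] = '"' then (pos : Int)
    else fuqA cs (pos + 1)
  else -1
termination_by cs.length - pos
decreasing_by all_goals omega

-- the while loop of _collect_multiline_value; parts is the list of collected fragments
def loopA (lines : List String) (i : Int) (parts : List (List Char)) : String × Int :=
  if h : i < (lines.length : Int) then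
    match PySem.List.pyGet? lines i with
    | none => (String.ofList (parts.foldl (· ++ ·) []), i)   -- IndexError in Python (outside Pre_)
    | some line =>
      let cs := line.toList
      let c := fuqA cs 0
      if c ≥ 0 then
        -- next_line[:close_pos], then break and "".join(parts)
        (String.ofList ((parts ++ [PySem.List.slice cs none (some c)]).foldl (· ++ ·) []), i + 1)
      else loopA lines (i + 1) (parts ++ [cs])
  else (String.ofList (parts.foldl (· ++ ·) []), i)
termination_by ((lines.length : Int) - i).toNat
decreasing_by omega

def collect_multiline_value_py (lines : List String) (start_idx : Int) (first_fragment : String) : String × Int :=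
  loopA lines start_idx [first_fragment.toList]

-- ===== PORT B =====
-- hand port of line.find('"', start): first index ≥ start holding '"', none = Python's -1 (exact)
def findQuote (cs : List Char) (j : Nat) : Option Nat :=
  if h : j < cs.length then
    if cs[j] = '"' then some j else findQuote cs (j + 1)
  else none
termination_by cs.length - j
decreasing_by omega

-- the inner 'while b > 0 and line[b-1] == "\\"' countdown
def runStart (cs : List Char) (b : Nat) : Nat :=
  if 0 < b ∧ cs[b - 1]? = some '\\' then runStart cs (b - 1) else b
termination_by b
decreasing_by omega

-- termination helper for fuqB (cited by its decreasing_by)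
theorem findQuote_some {cs : List Char} {j p : Nat} (h : findQuote cs j = some p) :
    j ≤ p ∧ p < cs.length := by
  fun_induction findQuote cs j with
  | case1 j hj hq => simp at h; omega
  | case2 j hj hq ih => have := ih h; omega
  | case3 j hj => simp at h

-- _find_closing_quote: jump to the next quote candidate, accept it iff the run of
-- backslashes immediately before it has even length
def fuqB (cs : List Char) (start : Nat) : Int :=
  match h : findQuote cs start with
  | none => -1
  | some p =>
    if (p - runStart cs p) % 2 = 0 then (p : Int) else fuqB cs (p + 1)
termination_by cs.length - start
decreasing_by have := findQuote_some h; omega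

-- Phase 1: the while loop locating the closing line; returns (i, close)
def scanB (lines : List String) (i : Int) : Int × Int :=
  if h : i < (lines.length : Int) then
    match PySem.List.pyGet? lines i with
    | none => (i, -1)   -- IndexError in Python (outside Pre_)
    | some line =>
      let c := fuqB line.toList 0
      if c ≥ 0 then (i, c) else scanB lines (i + 1)
  else (i, -1)
termination_by ((lines.length : Int) - i).toNat
decreasing_by omega

-- "".join([lines[k] for k in range(start_idx, i)]); pyGetD is exact here: under
-- Pre_ every index the range produces is in bounds
def bodyB (lines : List String) (a b : Int) : List Char :=
  ((PySem.List.pyRange a b 1).map (fun k => (PySem.List.pyGetD lines k "").toList)).foldl (· ++ ·) []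

def collect_multiline_value_py_alt (lines : List String) (start_idx : Int) (first_fragment : String) : String × Int :=
  let r := scanB lines start_idx
  let body := bodyB lines start_idx r.1
  if r.2 ≥ 0 then
    (String.ofList (first_fragment.toList ++ body ++
      PySem.List.slice (PySem.List.pyGetD lines r.1 "").toList none (some r.2)), r.1 + 1)
  else (String.ofList (first_fragment.toList ++ body), r.1)

-- ===== PRECONDITION & SPEC =====
-- Pre_ excludes exactly the inputs where A raises IndexError: start_idx below -len(lines)
-- makes the very first lines[i] access go out of range (B raises there too).
def Pre_collect_multiline_value_py (lines : List String) (start_idx : Int) (first_fragment : String) : Prop :=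
  -(lines.length : Int) ≤ start_idx

instance (lines : List String) (start_idx : Int) (first_fragment : String) : Decidable (Pre_collect_multiline_value_py lines start_idx first_fragment) := by unfold Pre_collect_multiline_value_py; infer_instance

def pvWitness_collect_multiline_value_py : List String × Int × String := (["ab", "c\"d"], 0, "v")

def Spec_collect_multiline_value_py (lines : List String) (start_idx : Int) (first_fragment : String) (out : String × Int) : Prop := out = collect_multiline_value_py_alt lines start_idx first_fragment
instance (lines : List String) (start_idx : Int) (first_fragment : String) (out : String × Int) : Decidable (Spec_collect_multiline_value_py lines start_idx first_fragment out) := by unfold Spec_collect_multiline_value_py; infer_instance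

-- ===== CLAIM (what is proved, stated in full; the proofs are below) =====
def Claim_equal_collect_multiline_value_py : Prop := ∀ (lines : List String) (start_idx : Int) (first_fragment : String), Dom_collect_multiline_value_py lines start_idx first_fragment → Pre_collect_multiline_value_py lines start_idx first_fragment → Spec_collect_multiline_value_py lines start_idx first_fragment (collect_multiline_value_py lines start_idx first_fragment)

-- ===== LEMMAS AND PROOFS =====

theorem runStart_le (cs : List Char) (b : Nat) : runStart cs b ≤ b := by
  fun_induction runStart cs b with
  | case1 b h ih => omega
  | case2 b h => omega

theorem runStart_zero (cs : List Char) : runStart cs 0 = 0 := by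
  rw [runStart]; simp

theorem runStart_succ_bs {cs : List Char} {b : Nat} (h : cs[b]? = some '\\') :
    runStart cs (b + 1) = runStart cs b := by
  rw [runStart]; simp [h]

theorem runStart_succ_not {cs : List Char} {b : Nat} (h : cs[b]? ≠ some '\\') :
    runStart cs (b + 1) = b + 1 := by
  rw [runStart]; simp [h]

theorem findQuote_ge_len {cs : List Char} {j : Nat} (h : cs.length ≤ j) :
    findQuote cs j = none := by
  rw [findQuote, dif_neg (by omega)]

theorem findQuote_self {cs : List Char} {j : Nat} (h : cs[j]? = some '"') :
    findQuote cs j = some j := by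
  obtain ⟨hj, hv⟩ := List.getElem?_eq_some_iff.mp h
  rw [findQuote, dif_pos hj, if_pos hv]

theorem findQuote_step {cs : List Char} {j : Nat} (h : cs[j]? ≠ some '"') :
    findQuote cs j = findQuote cs (j + 1) := by
  by_cases hj : j < cs.length
  · have hv : cs[j] ≠ '"' := fun e => h (by rw [List.getElem?_eq_getElem hj, e])
    rw [findQuote, dif_pos hj, if_neg hv]
  · rw [findQuote_ge_len (by omega), findQuote_ge_len (by omega)]

theorem fuqB_none {cs : List Char} {j : Nat} (h : findQuote cs j = none) :
    fuqB cs j = -1 := by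
  rw [fuqB]
  split
  · rfl
  · rename_i p hp; rw [h] at hp; cases hp

theorem fuqB_some {cs : List Char} {j p : Nat} (h : findQuote cs j = some p) :
    fuqB cs j = if (p - runStart cs p) % 2 = 0 then (p : Int) else fuqB cs (p + 1) := by
  rw [fuqB]
  split
  · rename_i hp; rw [h] at hp; cases hp
  · rename_i q hq; rw [h] at hq; injection hq with hq; subst hq; rfl

theorem fuqB_ge_len {cs : List Char} {j : Nat} (h : cs.length ≤ j) :
    fuqB cs j = -1 :=
  fuqB_none (findQuote_ge_len h)

theorem fuqB_step {cs : List Char} {j : Nat} (h : cs[j]? ≠ some '"') :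
    fuqB cs j = fuqB cs (j + 1) := by
  have hf := findQuote_step h
  cases hfq : findQuote cs (j + 1) with
  | none => rw [fuqB_none (hf.trans hfq), fuqB_none hfq]
  | some p => rw [fuqB_some (hf.trans hfq), fuqB_some hfq]

theorem fuqB_quote_odd {cs : List Char} {j : Nat} (h : cs[j]? = some '"')
    (ho : (j - runStart cs j) % 2 = 1) : fuqB cs j = fuqB cs (j + 1) := by
  rw [fuqB_some (findQuote_self h), if_neg (by omega)]

theorem fuqB_quote_even {cs : List Char} {j : Nat} (h : cs[j]? = some '"')
    (he : (j - runStart cs j) % 2 = 0) : fuqB cs j = (j : Int) := by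
  rw [fuqB_some (findQuote_self h), if_pos he]

-- the core equivalence of the two in-line scans: at any position whose preceding
-- backslash run has even length, A's skip automaton and B's candidate scan agree
theorem fuq_eq (cs : List Char) : ∀ n pos, cs.length - pos = n →
    (pos - runStart cs pos) % 2 = 0 → fuqA cs pos = fuqB cs pos := by
  intro n
  induction n using Nat.strong_induction_on with
  | _ n ih =>
  intro pos hn hev
  by_cases hp : pos < cs.length
  · have hget : cs[pos]? = some cs[pos] := List.getElem?_eq_getElem hp
    have hle := runStart_le cs pos
    rw [fuqA]
    by_cases hbs : cs[pos] = '\\'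
    · have hnq : cs[pos]? ≠ some '"' := by rw [hget, hbs]; decide
      by_cases hp1 : pos + 1 < cs.length
      · -- A skips two
        rw [dif_pos hp, if_pos ⟨hbs, hp1⟩]
        have hget1 : cs[pos + 1]? = some cs[pos + 1] := List.getElem?_eq_getElem hp1
        have hrs1 : runStart cs (pos + 1) = runStart cs pos :=
          runStart_succ_bs (by rw [hget, hbs])
        by_cases hbs1 : cs[pos + 1] = '\\'
        · -- run continues: parity at pos+2 preserved
          have hnq1 : cs[pos + 1]? ≠ some '"' := by rw [hget1, hbs1]; decide
          have hrs2 : runStart cs (pos + 2) = runStart cs pos := by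
            have h2 := runStart_succ_bs (cs := cs) (b := pos + 1) (by rw [hget1, hbs1])
            rw [hrs1] at h2; exact h2
          have hA := ih (cs.length - (pos + 2)) (by omega) (pos + 2) rfl
            (by rw [hrs2]; omega)
          have eB : fuqB cs pos = fuqB cs (pos + 2) := by
            rw [fuqB_step (j := pos) hnq]
            exact fuqB_step (j := pos + 1) hnq1
          rw [hA, eB]
        · -- run resets after the escaped char
          have hrs2 : runStart cs (pos + 2) = pos + 2 := by
            have h2 := runStart_succ_not (cs := cs) (b := pos + 1)
              (by rw [hget1]; simp [hbs1])
            exact h2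
          have hA := ih (cs.length - (pos + 2)) (by omega) (pos + 2) rfl
            (by rw [hrs2]; omega)
          have eB : fuqB cs pos = fuqB cs (pos + 2) := by
            rw [fuqB_step (j := pos) hnq]
            by_cases hq1 : cs[pos + 1] = '"'
            · -- an escaped quote: B rejects it by odd parity and moves past it too
              exact fuqB_quote_odd (j := pos + 1) (by rw [hget1, hq1])
                (by rw [hrs1]; omega)
            · exact fuqB_step (j := pos + 1) (by rw [hget1]; simp [hq1])
          rw [hA, eB]
      · -- backslash is the last char: A steps one, then hits the end
        have hq : cs[pos] ≠ '"' := by rw [hbs]; decide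
        rw [dif_pos hp, if_neg (by simp [hp1]), if_neg hq]
        rw [fuqA, dif_neg (by omega)]
        rw [fuqB_step (j := pos) hnq, fuqB_ge_len (j := pos + 1) (by omega)]
    · by_cases hq : cs[pos] = '"'
      · rw [dif_pos hp, if_neg (by simp [hbs]), if_pos hq]
        rw [fuqB_quote_even (by rw [hget, hq]) hev]
      · rw [dif_pos hp, if_neg (by simp [hbs]), if_neg hq]
        have hrs1 : runStart cs (pos + 1) = pos + 1 :=
          runStart_succ_not (by rw [hget]; simp [hbs])
        have hA := ih (cs.length - (pos + 1)) (by omega) (pos + 1) rfl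
          (by rw [hrs1]; omega)
        rw [hA, fuqB_step (j := pos) (by rw [hget]; simp [hq])]
  · rw [fuqA, dif_neg hp, fuqB_ge_len (by omega)]

theorem pyGetD_some {α : Type} {xs : List α} {i : Int} {x : α} (d : α)
    (h : PySem.List.pyGet? xs i = some x) : PySem.List.pyGetD xs i d = x := by
  simp only [PySem.List.pyGet?, PySem.List.pyGetD] at h ⊢
  rw [h]
  rfl

theorem foldl_append_init (l : List (List Char)) : ∀ x : List Char,
    l.foldl (· ++ ·) x = x ++ l.foldl (· ++ ·) [] := by
  induction l with
  | nil => simp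
  | cons y l ih =>
    intro x
    rw [List.foldl_cons, List.foldl_cons, ih (x ++ y), ih ([] ++ y)]
    simp [List.append_assoc]

theorem bodyB_empty (lines : List String) {a b : Int} (h : b ≤ a) :
    bodyB lines a b = [] := by
  rw [bodyB, PySem.List.pyRange_one]
  simp [show (b - a).toNat = 0 by omega]

theorem bodyB_cons (lines : List String) {a b : Int} (h : a < b) :
    bodyB lines a b = (PySem.List.pyGetD lines a "").toList ++ bodyB lines (a + 1) b := by
  rw [bodyB, bodyB, PySem.List.pyRange_one_cons (by omega)]
  simp only [List.map_cons, List.foldl_cons, List.nil_append]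
  rw [foldl_append_init]

theorem scanB_ge (lines : List String) : ∀ i, i ≤ (scanB lines i).1 := by
  intro i
  fun_induction scanB lines i <;> first | omega | simp

-- A's loop equals B's locate-then-join decomposition
theorem loopA_eq (lines : List String) : ∀ n i, ((lines.length : Int) - i).toNat = n →
    ∀ parts, loopA lines i parts =
      (if (scanB lines i).2 ≥ 0 then
        (String.ofList (parts.foldl (· ++ ·) [] ++ bodyB lines i (scanB lines i).1 ++
          PySem.List.slice (PySem.List.pyGetD lines (scanB lines i).1 "").toList none
            (some (scanB lines i).2)), (scanB lines i).1 + 1)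
      else (String.ofList (parts.foldl (· ++ ·) [] ++ bodyB lines i (scanB lines i).1),
        (scanB lines i).1)) := by
  intro n
  induction n using Nat.strong_induction_on with
  | _ n ih =>
  intro i hn parts
  rw [loopA, scanB]
  by_cases hi : i < (lines.length : Int)
  · simp only [hi, dif_pos]
    cases hg : PySem.List.pyGet? lines i with
    | none =>
      simp only []
      rw [if_neg (by omega), bodyB_empty lines (le_refl i)]
      simp
    | some line =>
      simp only []
      rw [fuq_eq line.toList _ 0 rfl (by rw [runStart_zero])]
      by_cases hc : fuqB line.toList 0 ≥ 0
      · simp only [hc, if_true]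
        simp [bodyB_empty lines (le_refl i), pyGetD_some "" hg, List.foldl_append]
      · simp only [hc, if_false]
        rw [ih (((lines.length : Int) - (i + 1)).toNat) (by omega) (i + 1) rfl]
        have hge := scanB_ge lines (i + 1)
        have hb : bodyB lines i (scanB lines (i + 1)).1 =
            line.toList ++ bodyB lines (i + 1) (scanB lines (i + 1)).1 := by
          rw [bodyB_cons lines (by omega), pyGetD_some "" hg]
        rw [hb]
        by_cases hs : (scanB lines (i + 1)).2 ≥ 0 <;>
          simp [hs, List.foldl_append, List.append_assoc]
  · simp only [hi, dif_neg, not_false_eq_true]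
    rw [if_neg (by omega), bodyB_empty lines (le_refl i)]
    simp

-- ===== VERDICT (by name: the statement is the Claim_ definition above) =====
theorem collect_multiline_value_py_spec : Claim_equal_collect_multiline_value_py := by
  intro lines start_idx first_fragment _ _
  unfold Spec_collect_multiline_value_py collect_multiline_value_py collect_multiline_value_py_alt
  rw [loopA_eq lines _ start_idx rfl]
  simp
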